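-- pv_equiv track=rewrite | github.com/AspenTheRoyal/slothbytesfun123 | nomnom.py | small_nom_nom
-- ===== SOURCE A (Python) =====
-- def small_nom_nom(tinylist,number):
--     if number+1 < len(tinylist):
--         if tinylist[number] > tinylist[number+1]:
--             tinylist[number] = tinylist[number]+tinylist[number+1]
--             del tinylist[number+1]
--             return small_nom_nom(tinylist,number)
--         else:
--             return small_nom_nom(tinylist,number+1)
--     else:
--         return tinylist
-- ===== SOURCE B (Python) =====
-- def small_nom_nom(tinylist, number):
--     out = tinylist[:number]
--     rest = tinylist[number:]
--     if rest:
--         cur = rest[0]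
--         for x in rest[1:]:
--             if cur > x:
--                 cur += x
--             else:
--                 out.append(cur)
--                 cur = x
--         out.append(cur)
--     return out
-- ===== Notes on version B (the rewrite author's own statement) =====
-- stated objective: faster
-- what changed: A repeatedly reads, rewrites and deletes inside the list by index, recursing after every step (each del is O(n)); B makes one left-to-right pass over tinylist[number:] keeping a running segment sum and appending to an output list, never deleting.
-- outside the precondition, e.g. on small_nom_nom([1, 2], -2): A returns [3], B returns [1, 2]; on small_nom_nom([], -2): A raises IndexError, B returns []
import Mathlib
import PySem

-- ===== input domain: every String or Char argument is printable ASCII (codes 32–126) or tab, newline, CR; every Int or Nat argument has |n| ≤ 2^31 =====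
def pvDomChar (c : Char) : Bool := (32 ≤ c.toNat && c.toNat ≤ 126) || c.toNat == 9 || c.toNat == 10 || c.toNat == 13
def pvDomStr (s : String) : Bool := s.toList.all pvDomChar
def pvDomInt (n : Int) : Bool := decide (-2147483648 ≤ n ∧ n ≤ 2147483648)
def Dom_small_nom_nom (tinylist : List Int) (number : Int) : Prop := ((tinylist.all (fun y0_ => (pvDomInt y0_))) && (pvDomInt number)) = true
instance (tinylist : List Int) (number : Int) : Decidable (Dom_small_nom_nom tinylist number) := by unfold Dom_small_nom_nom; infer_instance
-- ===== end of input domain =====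

-- B replaces A's recursive read/rewrite/delete-by-index with one left-to-right pass (asymptotically
-- faster); A mutates tinylist in place and returns it, B builds a fresh list — the equivalence
-- proved here is about the RETURN value only.

-- ===== PORT A =====
-- Python's t[i] = v / del t[i] on a valid (possibly negative) index i acts at position i+len if i<0, else i.
def pyNormIdx (n : Nat) (i : Int) : Nat := (if i < 0 then i + n else i).toNat

def small_nom_nom (tinylist : List Int) (number : Int) : List Int :=
  if _h : number + 1 < (tinylist.length : Int) then
    match _h1 : PySem.List.pyGet? tinylist number, _h2 : PySem.List.pyGet? tinylist (number + 1) with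
    | some a, some b =>
      if a > b then
        small_nom_nom
          ((tinylist.set (pyNormIdx tinylist.length number) (a + b)).eraseIdx
            (pyNormIdx tinylist.length (number + 1))) number
      else
        small_nom_nom tinylist (number + 1)
    | _, _ => tinylist  -- unreachable: the guard plus the reads succeeding; Python raised before this point otherwise
  else
    tinylist
termination_by tinylist.length + ((tinylist.length : Int) - number).toNat
decreasing_by
  · have hin : PySem.Raise.InRange tinylist.length (number + 1) := by
      by_contra hc
      have := (PySem.List.pyGet?_eq_none_iff (xs := tinylist) (i := number + 1)).mpr hc
      rw [this] at _h2
      simp at _h2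
    have hlt : pyNormIdx tinylist.length (number + 1) < ((tinylist.set (pyNormIdx tinylist.length number) (a + b))).length := by
      simp only [PySem.Raise.InRange] at hin
      simp only [pyNormIdx, List.length_set]
      omega
    have hlen : ((tinylist.set (pyNormIdx tinylist.length number) (a + b)).eraseIdx
        (pyNormIdx tinylist.length (number + 1))).length = tinylist.length - 1 := by
      rw [List.length_eraseIdx_of_lt hlt, List.length_set]
    rw [hlen]
    simp only [PySem.Raise.InRange] at *
    omega
  · omega

-- ===== PORT B =====
def small_nom_nom_alt (tinylist : List Int) (number : Int) : List Int :=
  let out := PySem.List.slice tinylist none (some number)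
  let rest := PySem.List.slice tinylist (some number) none
  match rest with
  | [] => out
  | cur0 :: rest1 =>
    let s := rest1.foldl
      (fun (s : List Int × Int) x => if s.2 > x then (s.1, s.2 + x) else (s.1 ++ [s.2], x))
      (out, cur0)
    s.1 ++ [s.2]

-- ===== PRECONDITION & SPEC =====
-- Pre_ excludes negative number: there A's comparisons and deletions use Python's negative-index
-- wraparound on a list that shrinks while the index stays relative to the end — an accident of the
-- implementation that usually ends in an IndexError mid-recursion — while B simply treats number
-- as a start position.
def Pre_small_nom_nom (tinylist : List Int) (number : Int) : Prop := 0 ≤ number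
instance (tinylist : List Int) (number : Int) : Decidable (Pre_small_nom_nom tinylist number) := by unfold Pre_small_nom_nom; infer_instance

def pvWitness_small_nom_nom : List Int × Int := ([3, 1, 2, 7, 4], 0)

def Spec_small_nom_nom (tinylist : List Int) (number : Int) (out : List Int) : Prop := out = small_nom_nom_alt tinylist number
instance (tinylist : List Int) (number : Int) (out : List Int) : Decidable (Spec_small_nom_nom tinylist number out) := by unfold Spec_small_nom_nom; infer_instance

-- ===== CLAIM (what is proved, stated in full; the proofs are below) =====
def Claim_equal_small_nom_nom : Prop := ∀ (tinylist : List Int) (number : Int), Dom_small_nom_nom tinylist number → Pre_small_nom_nom tinylist number → Spec_small_nom_nom tinylist number (small_nom_nom tinylist number)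

-- ===== LEMMAS AND PROOFS =====

-- the merged-segment shape both programs compute, used only by the proofs
def nomGo (cur : Int) : List Int → List Int
  | [] => [cur]
  | x :: xs => if cur > x then nomGo (cur + x) xs else cur :: nomGo x xs

def nomChunk : List Int → List Int
  | [] => []
  | x :: xs => nomGo x xs

theorem foldl_nomGo (rest : List Int) (out : List Int) (cur : Int) :
    (rest.foldl (fun (s : List Int × Int) x => if s.2 > x then (s.1, s.2 + x) else (s.1 ++ [s.2], x)) (out, cur)).1
      ++ [(rest.foldl (fun (s : List Int × Int) x => if s.2 > x then (s.1, s.2 + x) else (s.1 ++ [s.2], x)) (out, cur)).2]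
    = out ++ nomGo cur rest := by
  induction rest generalizing out cur with
  | nil => simp [nomGo]
  | cons x xs ih =>
    simp only [List.foldl_cons, nomGo]
    by_cases h : cur > x
    · simp [h, ih]
    · simp [h, ih, List.append_assoc]

theorem alt_eq_chunk (t : List Int) (n : Int) (hn : 0 ≤ n) :
    small_nom_nom_alt t n = t.take n.toNat ++ nomChunk (t.drop n.toNat) := by
  unfold small_nom_nom_alt
  rw [PySem.List.slice_to t hn, PySem.List.slice_from t hn]
  cases h : t.drop n.toNat with
  | nil => simp [nomChunk]
  | cons c r => simp only [nomChunk, foldl_nomGo]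

theorem a_eq_chunk (t : List Int) (n : Int) (hn : 0 ≤ n) :
    small_nom_nom t n = t.take n.toNat ++ nomChunk (t.drop n.toNat) := by
  fun_induction small_nom_nom t n with
  | case1 t n hg a b h1 h2 hab ih =>
    have hn : (0:Int) ≤ n := hn
    have hk : n.toNat < t.length := by omega
    have hk1 : n.toNat + 1 < t.length := by omega
    rw [PySem.List.pyGet?_of_nonneg t hn] at h1
    rw [PySem.List.pyGet?_of_nonneg t (show (0:Int) ≤ n+1 by omega)] at h2
    have hts : (n+1).toNat = n.toNat + 1 := by omega
    rw [hts] at h2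
    have ha : t[n.toNat] = a := by
      have := List.getElem?_eq_getElem hk; rw [this] at h1; exact Option.some.inj h1
    have hb : t[n.toNat + 1] = b := by
      have := List.getElem?_eq_getElem hk1; rw [this] at h2; exact Option.some.inj h2
    have e1 : pyNormIdx t.length n = n.toNat := by simp only [pyNormIdx]; omega
    have e2 : pyNormIdx t.length (n+1) = n.toNat + 1 := by simp only [pyNormIdx]; omega
    rw [e1, e2] at ih ⊢
    have hset : t.set n.toNat (a+b) = t.take n.toNat ++ (a+b) :: t.drop (n.toNat+1) :=
      List.set_eq_take_cons_drop _ hk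
    have hlentake : (t.take n.toNat).length = n.toNat := by simp [List.length_take]; omega
    have ht' : (t.set n.toNat (a+b)).eraseIdx (n.toNat+1)
        = t.take n.toNat ++ (a+b) :: t.drop (n.toNat+2) := by
      rw [hset, List.eraseIdx_eq_take_drop_succ, List.take_append, List.drop_append, hlentake]
      have e3 : n.toNat + 1 - n.toNat = 1 := by omega
      have e4 : n.toNat + 1 + 1 - n.toNat = 2 := by omega
      rw [e3, e4]
      simp [List.take_take, List.drop_drop]
      omega
    rw [ih hn, ht']
    have e5 : List.take n.toNat (t.take n.toNat ++ (a+b) :: t.drop (n.toNat+2)) = t.take n.toNat := by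
      rw [List.take_append, hlentake]
      simp [List.take_take]
    have e6 : List.drop n.toNat (t.take n.toNat ++ (a+b) :: t.drop (n.toNat+2))
        = (a+b) :: t.drop (n.toNat+2) := by
      rw [List.drop_append, hlentake]
      simp
    rw [e5, e6]
    have hd : t.drop n.toNat = a :: b :: t.drop (n.toNat+2) := by
      rw [List.drop_eq_getElem_cons hk, ha, List.drop_eq_getElem_cons hk1, hb]
    rw [hd]
    simp [nomChunk, nomGo, hab]
  | case2 t n hg a b h1 h2 hab ih =>
    have hn : (0:Int) ≤ n := hn
    have hk : n.toNat < t.length := by omega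
    have hk1 : n.toNat + 1 < t.length := by omega
    rw [PySem.List.pyGet?_of_nonneg t hn] at h1
    rw [PySem.List.pyGet?_of_nonneg t (show (0:Int) ≤ n+1 by omega)] at h2
    have hts : (n+1).toNat = n.toNat + 1 := by omega
    rw [hts] at h2
    have ha : t[n.toNat] = a := by
      have := List.getElem?_eq_getElem hk; rw [this] at h1; exact Option.some.inj h1
    have hb : t[n.toNat + 1] = b := by
      have := List.getElem?_eq_getElem hk1; rw [this] at h2; exact Option.some.inj h2
    rw [ih (by omega), hts]
    have hd : t.drop n.toNat = a :: t.drop (n.toNat+1) := by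
      rw [List.drop_eq_getElem_cons hk, ha]
    have hd1 : t.drop (n.toNat+1) = b :: t.drop (n.toNat+2) := by
      rw [List.drop_eq_getElem_cons hk1, hb]
    have htake : t.take (n.toNat+1) = t.take n.toNat ++ [a] := by
      rw [List.take_succ_eq_append_getElem hk, ha]
    rw [htake, hd, hd1]
    simp [nomChunk, nomGo, hab]
  | case3 t n hg hnone =>
    have hn : (0:Int) ≤ n := hn
    have hk : n.toNat < t.length := by omega
    have hk1 : n.toNat + 1 < t.length := by omega
    have h1' : PySem.List.pyGet? t n = some t[n.toNat] := by
      rw [PySem.List.pyGet?_of_nonneg t hn]; exact List.getElem?_eq_getElem hk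
    have h2' : PySem.List.pyGet? t (n+1) = some t[n.toNat+1] := by
      rw [PySem.List.pyGet?_of_nonneg t (show (0:Int) ≤ n+1 by omega)]
      have hts : (n+1).toNat = n.toNat + 1 := by omega
      rw [hts]; exact List.getElem?_eq_getElem hk1
    exact False.elim (hnone _ _ h1' h2')
  | case4 t n hg =>
    have hlen : (t.drop n.toNat).length ≤ 1 := by
      simp only [List.length_drop]; omega
    have hc : nomChunk (t.drop n.toNat) = t.drop n.toNat := by
      rcases hd : t.drop n.toNat with _ | ⟨x, _ | ⟨y, r⟩⟩
      · simp [nomChunk]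
      · simp [nomChunk, nomGo]
      · rw [hd] at hlen; simp at hlen
    rw [hc, List.take_append_drop]

-- ===== VERDICT (by name: the statement is the Claim_ definition above) =====
theorem small_nom_nom_spec : Claim_equal_small_nom_nom := by
  intro t n _ hpre
  unfold Spec_small_nom_nom
  rw [a_eq_chunk t n hpre, alt_eq_chunk t n hpre]
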